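-- pv_equiv track=rewrite | github.com/Honuratus/PySysCheck | src/probes/os_probe.py | _parse_distro_data
-- ===== SOURCE A (Python) =====
-- def _parse_distro_data(content):
--     distro_name = 'Unknown Linux'
--     if not content: return distro_name
--
--     for line in content.split("\n"):
--         if line.startswith('PRETTY_NAME='):
--             distro_name = line.split('=',1)[1].replace('"', '').strip()
--             break
--
--     return distro_name
-- ===== SOURCE B (Python) =====
-- def _parse_distro_data(content):
--     if not content:
--         return 'Unknown Linux'
--     table = {}
--     for line in content.split("\n"):
--         if '=' in line:
--             key, _, value = line.partition('=')
--             table.setdefault(key, value)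
--     if 'PRETTY_NAME' in table:
--         return table['PRETTY_NAME'].replace('"', '').strip()
--     return 'Unknown Linux'
-- ===== Notes on version B (the rewrite author's own statement) =====
-- stated objective: idiomatic
-- what changed: B parses the whole os-release content into a key->value dict (first occurrence wins, line.partition('=')) and then looks up 'PRETTY_NAME', instead of A's early-break scan for a line with the 'PRETTY_NAME=' prefix.
import Mathlib
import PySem

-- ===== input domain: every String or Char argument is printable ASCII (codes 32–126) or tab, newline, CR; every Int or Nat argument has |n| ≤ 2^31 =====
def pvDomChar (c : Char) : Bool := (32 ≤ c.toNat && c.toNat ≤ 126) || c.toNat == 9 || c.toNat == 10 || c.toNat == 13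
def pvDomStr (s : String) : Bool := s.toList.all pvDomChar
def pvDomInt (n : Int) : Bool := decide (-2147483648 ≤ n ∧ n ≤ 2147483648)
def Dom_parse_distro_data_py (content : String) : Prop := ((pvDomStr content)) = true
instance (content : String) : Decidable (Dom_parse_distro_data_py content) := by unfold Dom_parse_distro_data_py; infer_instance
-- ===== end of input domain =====

-- B rewrites A's early-break 'PRETTY_NAME=' prefix scan as: parse every '='-line into a
-- key->value dict (first occurrence wins, via partition/setdefault), then look up
-- 'PRETTY_NAME' — same return value, more idiomatic.

-- ===== PORT A =====
-- A's for-loop with break: the first line starting with 'PRETTY_NAME=' wins, else the default.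
def pvLoopA : List String → String
  | [] => "Unknown Linux"
  | line :: rest =>
    if PySem.Str.startswith line "PRETTY_NAME=" then
      -- line.split('=',1)[1]: on this branch the split has two parts, so index 1 exists
      -- and neither getD default is ever taken.
      PySem.Str.strip (PySem.Str.replace
        ((PySem.List.pyGet? ((PySem.Str.splitMax? line "=" 1).getD []) 1).getD "") "\"" "")
    else pvLoopA rest

def parse_distro_data_py (content : String) : String :=
  if content = "" then "Unknown Linux"
  else pvLoopA ((PySem.Str.split? content "\n").getD [])

-- ===== PORT B =====
-- line.partition('='): key = part before the first '=', value = part after it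
-- (exact for Python's partition when '=' ∈ line, which the isIn guard ensures).
def pvPartKey (line : String) : String := String.ofList (line.toList.takeWhile (· != '='))
def pvPartVal (line : String) : String := String.ofList ((line.toList.dropWhile (· != '=')).drop 1)

def pvBuildB : List String → PySem.Dict String String → PySem.Dict String String
  | [], d => d
  | line :: rest, d =>
    pvBuildB rest
      (if PySem.Str.isIn "=" line then d.setdefault (pvPartKey line) (pvPartVal line) else d)

def parse_distro_data_py_alt (content : String) : String :=
  if content = "" then "Unknown Linux"
  else
    match (pvBuildB ((PySem.Str.split? content "\n").getD []) PySem.Dict.empty).get? "PRETTY_NAME" with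
    | some v => PySem.Str.strip (PySem.Str.replace v "\"" "")
    | none => "Unknown Linux"

-- ===== PRECONDITION & SPEC =====
def Spec_parse_distro_data_py (content : String) (out : String) : Prop := out = parse_distro_data_py_alt content
instance (content : String) (out : String) : Decidable (Spec_parse_distro_data_py content out) := by unfold Spec_parse_distro_data_py; infer_instance

-- ===== CLAIM (what is proved, stated in full; the proofs are below) =====
def Claim_equal_parse_distro_data_py : Prop := ∀ (content : String), Dom_parse_distro_data_py content → Spec_parse_distro_data_py content (parse_distro_data_py content)

-- ===== LEMMAS AND PROOFS =====


theorem pv_tw_self (p : List Char) (h : '=' ∉ p) : p.takeWhile (· != '=') = p := by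
  rw [List.takeWhile_eq_self_iff]; intro a ha
  simp only [bne_iff_ne, ne_eq]
  intro e; rw [e] at ha; exact h ha

theorem pv_go_m0 (fuel : Nat) (rest : List Char) (acc : List (List Char)) :
    PySem.Chars.splitOnMax.go ['='] fuel 0 rest [] acc = (rest :: acc).reverse := by
  cases fuel with
  | zero => simp [PySem.Chars.splitOnMax.go]
  | succ f => cases rest <;> simp [PySem.Chars.splitOnMax.go]

theorem pv_go_split (p : List Char) (h : '=' ∉ p) : ∀ (fuel : Nat) (rest cur : List Char) (acc : List (List Char)),
    p.length < fuel →
    PySem.Chars.splitOnMax.go ['='] fuel 1 (p ++ '=' :: rest) cur acc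
      = (rest :: (cur.reverse ++ p) :: acc).reverse := by
  induction p with
  | nil =>
    intro fuel rest cur acc hf
    match fuel, hf with
    | fuel + 1, _ =>
      rw [PySem.Chars.splitOnMax.go.eq_def]
      simp [pv_go_m0]
  | cons c p ih =>
    intro fuel rest cur acc hf
    match fuel, hf with
    | fuel + 1, hf =>
      rw [PySem.Chars.splitOnMax.go.eq_def]
      have hc : (c == '=') = false := by
        simp; intro e; rw [e] at h; exact h (List.mem_cons_self)
      simp [List.isPrefixOf]
      rw [ih (h := fun m => h (List.mem_cons_of_mem _ m)) fuel rest (c :: cur) acc (by simpa using hf)]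
      simp
      intro e; exact absurd e.symm (by simpa using hc)

theorem pv_split_decomp (p rest : List Char) (h : '=' ∉ p) :
    PySem.Chars.splitOnMax (p ++ '=' :: rest) ['='] 1 = [p, rest] := by
  unfold PySem.Chars.splitOnMax
  rw [if_neg (by norm_num)]
  rw [show Int.toNat 1 = 1 from rfl]
  rw [pv_go_split p h _ rest [] [] (by simp)]
  simp

-- decomposition of a line containing '=' at its first '='
theorem pv_decomp_of_mem (l : List Char) (h : '=' ∈ l) :
    l = l.takeWhile (· != '=') ++ '=' :: ((l.dropWhile (· != '=')).drop 1)
      ∧ '=' ∉ l.takeWhile (· != '=') := by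
  induction l with
  | nil => cases h
  | cons c t ih =>
    by_cases hc : c = '='
    · subst hc; simp
    · have hm : '=' ∈ t := by cases h with | head => exact absurd rfl hc | tail _ m => exact m
      have := ih hm
      constructor
      · conv_lhs => rw [this.1]
        simp [hc]
      · simp [hc]
        exact ⟨fun e => hc e.symm, this.2⟩

theorem pv_startswith_iff (line : String) :
    PySem.Str.startswith line "PRETTY_NAME=" = true ↔
      ∃ rest, line.toList = "PRETTY_NAME".toList ++ '=' :: rest := by
  rw [show PySem.Str.startswith line "PRETTY_NAME=" = PySem.Chars.startswith line.toList "PRETTY_NAME=".toList from by simp]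
  rw [PySem.Chars.startswith_iff]
  constructor
  · rintro ⟨t, ht⟩; exact ⟨t, by rw [← ht]; rfl⟩
  · rintro ⟨t, ht⟩; exact ⟨t, by rw [ht]; rfl⟩

-- per-line facts on a hit
theorem pv_hit_val (line : String) (rest : List Char)
    (hl : line.toList = "PRETTY_NAME".toList ++ '=' :: rest) :
    ((PySem.List.pyGet? ((PySem.Str.splitMax? line "=" 1).getD []) 1).getD "") = String.ofList rest := by
  have hsplit : PySem.Chars.splitOnMax line.toList ['='] 1 = ["PRETTY_NAME".toList, rest] := by
    rw [hl]; exact pv_split_decomp _ _ (by decide)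
  simp [PySem.Str.splitMax?, PySem.Chars.splitMax?, hsplit, PySem.List.pyGet?, PySem.List.pyIdx?]

theorem pv_tw_append (p l : List Char) (h : '=' ∉ p) :
    (p ++ '=' :: l).takeWhile (· != '=') = p := by
  rw [List.takeWhile_append, if_pos (by rw [pv_tw_self p h])]
  simp

theorem pv_hit_key (line : String) (rest : List Char)
    (hl : line.toList = "PRETTY_NAME".toList ++ '=' :: rest) :
    pvPartKey line = "PRETTY_NAME" := by
  unfold pvPartKey
  rw [hl, pv_tw_append _ _ (by decide)]
  rfl

theorem pv_hit_pval (line : String) (rest : List Char)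
    (hl : line.toList = "PRETTY_NAME".toList ++ '=' :: rest) :
    pvPartVal line = String.ofList rest := by
  unfold pvPartVal
  rw [hl, List.dropWhile_append]
  have h1 : ("PRETTY_NAME".toList).dropWhile (· != '=') = [] := by decide
  rw [h1]
  rfl

theorem pv_hit_isIn (line : String) (rest : List Char)
    (hl : line.toList = "PRETTY_NAME".toList ++ '=' :: rest) :
    PySem.Str.isIn "=" line = true := by
  rw [PySem.Str.isIn_iff_infix]
  rw [show ("=" : String).toList = ['='] from rfl, List.singleton_infix_iff, hl]
  exact List.mem_append_right _ (List.mem_cons_self)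

-- on a miss with '=' in the line, the key is not PRETTY_NAME
theorem pv_miss_key (line : String)
    (hs : PySem.Str.startswith line "PRETTY_NAME=" = false)
    (hin : PySem.Str.isIn "=" line = true) :
    "PRETTY_NAME" ≠ pvPartKey line := by
  intro he
  have hm : '=' ∈ line.toList := by
    rw [PySem.Str.isIn_iff_infix, show ("=" : String).toList = ['='] from rfl,
        List.singleton_infix_iff] at hin
    exact hin
  obtain ⟨hdec, _⟩ := pv_decomp_of_mem line.toList hm
  have hk : line.toList.takeWhile (· != '=') = "PRETTY_NAME".toList := by
    have := congrArg String.toList he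
    simpa [pvPartKey, String.toList_ofList] using this.symm
  have : PySem.Str.startswith line "PRETTY_NAME=" = true := by
    rw [pv_startswith_iff]
    exact ⟨_, by rw [← hk]; exact hdec⟩
  rw [hs] at this; cases this

theorem pvBuildB_preserve (lines : List String) : ∀ (d : PySem.Dict String String) (v : String),
    d.get? "PRETTY_NAME" = some v → (pvBuildB lines d).get? "PRETTY_NAME" = some v := by
  induction lines with
  | nil => intro d v h; exact h
  | cons line rest ih =>
    intro d v h
    simp only [pvBuildB]
    apply ih
    by_cases hin : PySem.Str.isIn "=" line
    · rw [if_pos hin]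
      by_cases hk : "PRETTY_NAME" = pvPartKey line
      · rw [← hk, PySem.Dict.get?_setdefault_self, h]; simp
      · rw [PySem.Dict.get?_setdefault_of_ne _ _ hk]; exact h
    · rw [if_neg hin]; exact h

theorem parse_distro_data_py_main : ∀ (lines : List String) (d : PySem.Dict String String),
    d.get? "PRETTY_NAME" = none →
    pvLoopA lines =
      (match (pvBuildB lines d).get? "PRETTY_NAME" with
        | some v => PySem.Str.strip (PySem.Str.replace v "\"" "")
        | none => "Unknown Linux") := by
  intro lines
  induction lines with
  | nil => intro d h; simp [pvLoopA, pvBuildB, h]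
  | cons line rest ih =>
    intro d h
    by_cases hs : PySem.Str.startswith line "PRETTY_NAME=" = true
    · obtain ⟨r, hl⟩ := (pv_startswith_iff line).mp hs
      have hin := pv_hit_isIn line r hl
      have hnc : d.contains (pvPartKey line) = false := by
        rw [pv_hit_key line r hl, PySem.Dict.contains_eq_isSome_get?, h]; rfl
      have hset : (pvBuildB rest (d.setdefault (pvPartKey line) (pvPartVal line))).get? "PRETTY_NAME"
          = some (String.ofList r) := by
        apply pvBuildB_preserve
        rw [PySem.Dict.setdefault_of_not_contains _ _ hnc, pv_hit_key line r hl,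
            PySem.Dict.get?_insert_self, pv_hit_pval line r hl]
      simp only [pvLoopA, pvBuildB, if_pos hs, if_pos hin, hset, pv_hit_val line r hl]
    · have hs' : PySem.Str.startswith line "PRETTY_NAME=" = false := by
        cases hb : PySem.Str.startswith line "PRETTY_NAME=" with
        | false => rfl
        | true => exact absurd hb hs
      simp only [pvLoopA, pvBuildB, if_neg hs]
      apply ih
      by_cases hin : PySem.Str.isIn "=" line
      · rw [if_pos hin, PySem.Dict.get?_setdefault_of_ne _ _ (pv_miss_key line hs' hin)]
        exact h
      · rw [if_neg hin]; exact h


-- ===== VERDICT (by name: the statement is the Claim_ definition above) =====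
theorem parse_distro_data_py_spec : Claim_equal_parse_distro_data_py := by
  intro content _
  unfold Spec_parse_distro_data_py parse_distro_data_py parse_distro_data_py_alt
  by_cases h : content = "" <;> simp [h]
  exact parse_distro_data_py_main _ PySem.Dict.empty (by simp [pysem])
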